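-- pv_equiv track=rewrite | github.com/pypi-data/pypi-mirror-370 | packages/rapidpe-rift-pipe/rapidpe_rift_pipe-0.7.2.dev20250818.tar.gz/rapidpe_rift_pipe-0.7.2.dev20250818/src/rapidpe_rift_pipe/config.py | fields_match
-- ===== SOURCE A (Python) =====
-- def fields_match(fields, field_descriptors) -> bool:
--     """
--     Returns `True` if the fields match precisely with the fields named in the
--     descriptors, though if the descriptors have a `"fallback"` value, they do
--     not need to be present.  Otherwise return `False`.
--     """
--     # Make copies that we can modify
--     fields_remaining = fields.copy()
--     field_descriptors_remaining = field_descriptors.copy()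
--
--     # Iterate through fields, removing from both data structures if present, and
--     # returning `False` if a field is not in the descriptors.
--     while fields_remaining:
--         field, _ = fields_remaining.pop()
--         if field not in field_descriptors_remaining:
--             return False
--         del field_descriptors_remaining[field]
--
--     # Now the only remaining descriptors should have `"fallback"` values.
--     for field, descriptor in field_descriptors_remaining.items():
--         if "fallback" not in descriptor:
--             return False
--
--     # Everything matched, return `True`.
--     return True
-- ===== SOURCE B (Python) =====
-- def fields_match(fields, field_descriptors) -> bool:
--     """
--     Returns `True` if the fields match precisely with the fields named in the
--     descriptors, though if the descriptors have a `"fallback"` value, they do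
--     not need to be present.  Otherwise return `False`.
--     """
--     names = {field for field, _ in fields}
--     # Two fields sharing a name can never both be matched against the descriptors.
--     if len(names) != len(fields):
--         return False
--     if not names <= field_descriptors.keys():
--         return False
--     # Every descriptor not used by a field must provide a fallback.
--     return all(
--         "fallback" in descriptor
--         for name, descriptor in field_descriptors.items()
--         if name not in names
--     )
-- ===== Notes on version B (the rewrite author's own statement) =====
-- stated objective: simpler
-- what changed: Replaces A's destructive pop/delete loop over mutable copies with a pure set-based check: collect the field names once, test them for duplicates and for being a subset of the descriptor keys, then require a fallback in every unused descriptor.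
import Mathlib
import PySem

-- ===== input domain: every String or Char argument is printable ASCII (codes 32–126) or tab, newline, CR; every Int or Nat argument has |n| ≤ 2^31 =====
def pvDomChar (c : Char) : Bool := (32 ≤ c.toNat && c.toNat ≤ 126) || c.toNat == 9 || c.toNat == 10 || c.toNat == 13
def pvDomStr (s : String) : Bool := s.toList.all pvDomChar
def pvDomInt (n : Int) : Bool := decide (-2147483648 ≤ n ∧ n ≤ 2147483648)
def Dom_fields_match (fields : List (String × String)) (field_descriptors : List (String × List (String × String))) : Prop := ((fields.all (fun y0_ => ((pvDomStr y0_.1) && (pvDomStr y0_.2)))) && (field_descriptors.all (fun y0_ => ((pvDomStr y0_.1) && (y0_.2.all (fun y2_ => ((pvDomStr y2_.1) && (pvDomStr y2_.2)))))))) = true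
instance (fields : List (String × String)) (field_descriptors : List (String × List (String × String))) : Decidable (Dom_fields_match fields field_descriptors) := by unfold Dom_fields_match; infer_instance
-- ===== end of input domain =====

-- B replaces A's destructive pop/delete loop over mutable copies with a pure set-based
-- check (duplicate-free names, subset of descriptor keys, fallback in unused descriptors);
-- objective: simpler.  A mutates only its local copies, so return-value equivalence is full.

-- ===== PORT A =====
-- Python's set.pop() removes an arbitrary element; the result below is independent of the
-- pop order (proved by the characterisation lemma), so we pop from the end of the list.
-- 'field not in field_descriptors_remaining' is Dict.contains, 'del d[field]' is Dict.erase.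
def fieldsMatchLoop : List (String × String) → PySem.Dict String (List (String × String)) → Bool
  | [], dr =>
      -- for field, descriptor in field_descriptors_remaining.items():
      --     if "fallback" not in descriptor: return False
      -- return True
      dr.items.all (fun q => PySem.Dict.contains (PySem.Dict.mk q.2) "fallback")
  | (field, _) :: rest, dr =>
      if PySem.Dict.contains dr field then
        fieldsMatchLoop rest (PySem.Dict.erase dr field)
      else
        false

def fields_match (fields : List (String × String)) (field_descriptors : List (String × List (String × String))) : Bool :=
  fieldsMatchLoop fields.reverse (PySem.Dict.mk field_descriptors)

-- ===== PORT B =====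
def fields_match_alt (fields : List (String × String)) (field_descriptors : List (String × List (String × String))) : Bool :=
  let names : PySem.Set String := PySem.Set.ofList (fields.map Prod.fst)
  if names.length = fields.length then
    if PySem.Set.issubset names (PySem.Dict.mk field_descriptors).keys then
      -- all("fallback" in descriptor for name, descriptor in field_descriptors.items()
      --     if name not in names)
      ((PySem.Dict.mk field_descriptors).items.filter
          (fun q => !(PySem.Set.contains names q.1))).all
        (fun q => PySem.Dict.contains (PySem.Dict.mk q.2) "fallback")
    else
      false
  else
    false

-- ===== PRECONDITION & SPEC =====
def Spec_fields_match (fields : List (String × String)) (field_descriptors : List (String × List (String × String))) (out : Bool) : Prop := out = fields_match_alt fields field_descriptors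
instance (fields : List (String × String)) (field_descriptors : List (String × List (String × String))) (out : Bool) : Decidable (Spec_fields_match fields field_descriptors out) := by unfold Spec_fields_match; infer_instance

-- ===== CLAIM (what is proved, stated in full; the proofs are below) =====
def Claim_equal_fields_match : Prop := ∀ (fields : List (String × String)) (field_descriptors : List (String × List (String × String))), Dom_fields_match fields field_descriptors → Spec_fields_match fields field_descriptors (fields_match fields field_descriptors)

-- ===== LEMMAS AND PROOFS =====

-- The common characterisation both ports are reduced to.
def FMSpec (fields : List (String × String)) (l : List (String × List (String × String))) : Prop :=
  (fields.map Prod.fst).Nodup ∧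
  (∀ p ∈ fields, ∃ q ∈ l, q.1 = p.1) ∧
  (∀ q ∈ l, (∃ p ∈ fields, p.1 = q.1) ∨
            PySem.Dict.contains (PySem.Dict.mk q.2) "fallback" = true)

theorem erase_mk_eq (l : List (String × List (String × String))) (f : String) :
    PySem.Dict.erase (PySem.Dict.mk l) f
      = PySem.Dict.mk (l.filter (fun p => !(p.1 == f))) := rfl

theorem fieldsMatchLoop_iff (fr : List (String × String)) (l : List (String × List (String × String))) :
    fieldsMatchLoop fr (PySem.Dict.mk l) = true ↔ FMSpec fr l := by
  induction fr generalizing l with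
  | nil =>
      simp [fieldsMatchLoop, FMSpec, List.all_eq_true]
  | cons hd rest ih =>
      obtain ⟨f, v⟩ := hd
      rw [fieldsMatchLoop, erase_mk_eq]
      by_cases h : PySem.Dict.contains (PySem.Dict.mk l) f = true
      · rw [if_pos h, ih]
        unfold FMSpec
        simp only [List.map_cons, List.nodup_cons]
        have hex : ∃ q ∈ l, q.1 = f := by
          simpa [PySem.Dict.contains, List.any_eq_true] using h
        constructor
        · rintro ⟨hnd, hall, hrem⟩
          have hfnot : f ∉ rest.map Prod.fst := by
            intro hf
            obtain ⟨p, hp, hpf⟩ := List.mem_map.mp hf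
            obtain ⟨q, hq, hq1⟩ := hall p hp
            have := List.mem_filter.mp hq
            simp [hq1, hpf] at this
          refine ⟨⟨hfnot, hnd⟩, ?_, ?_⟩
          · intro p hp
            rcases List.mem_cons.mp hp with rfl | hp'
            · exact hex
            · obtain ⟨q, hq, hq1⟩ := hall p hp'
              exact ⟨q, (List.mem_filter.mp hq).1, hq1⟩
          · intro q hq
            by_cases hqf : q.1 = f
            · exact Or.inl ⟨(f, v), List.mem_cons_self .., hqf.symm⟩
            · have hq' : q ∈ l.filter (fun p => !(p.1 == f)) :=
                List.mem_filter.mpr ⟨hq, by simp [hqf]⟩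
              rcases hrem q hq' with ⟨p, hp, hpq⟩ | hfb
              · exact Or.inl ⟨p, List.mem_cons_of_mem _ hp, hpq⟩
              · exact Or.inr hfb
        · rintro ⟨⟨hfnot, hnd⟩, hall, hrem⟩
          refine ⟨hnd, ?_, ?_⟩
          · intro p hp
            obtain ⟨q, hq, hq1⟩ := hall p (List.mem_cons_of_mem _ hp)
            have hpf : p.1 ≠ f := fun hc => hfnot (List.mem_map.mpr ⟨p, hp, hc⟩)
            exact ⟨q, List.mem_filter.mpr ⟨hq, by simp [hq1, hpf]⟩, hq1⟩
          · intro q hq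
            obtain ⟨hql, hqf⟩ := List.mem_filter.mp hq
            have hqf' : q.1 ≠ f := by simpa using hqf
            rcases hrem q hql with ⟨p, hp, hpq⟩ | hfb
            · rcases List.mem_cons.mp hp with rfl | hp'
              · exact absurd hpq.symm hqf'
              · exact Or.inl ⟨p, hp', hpq⟩
            · exact Or.inr hfb
      · rw [if_neg h]
        simp only [Bool.false_eq_true, false_iff]
        rintro ⟨-, hall, -⟩
        obtain ⟨q, hq, hq1⟩ := hall (f, v) (List.mem_cons_self ..)
        apply h
        simp only [PySem.Dict.contains, List.any_eq_true]
        exact ⟨q, hq, by simp [hq1]⟩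

theorem fields_match_iff (fields : List (String × String)) (l : List (String × List (String × String))) :
    fields_match fields l = true ↔ FMSpec fields l := by
  rw [fields_match, fieldsMatchLoop_iff]
  unfold FMSpec
  simp [List.mem_reverse]

-- set(xs) is a sublist of xs (first occurrences, in order).
theorem ofList_sublist (xs : List String) : List.Sublist (PySem.Set.ofList xs) xs := by
  induction xs with
  | nil => simp [PySem.Set.ofList_nil]
  | cons x xs ih =>
      rw [PySem.Set.ofList_cons]
      exact List.Sublist.cons₂ x (List.Sublist.trans List.filter_sublist ih)

-- len(set(xs)) == len(xs) iff xs has no duplicates.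
theorem length_ofList_eq_iff (xs : List String) :
    (PySem.Set.ofList xs).length = xs.length ↔ xs.Nodup := by
  constructor
  · intro h
    have := (ofList_sublist xs).eq_of_length h
    rw [← this]
    exact PySem.Set.nodup_ofList xs
  · intro h
    rw [PySem.Set.ofList_eq_self_of_nodup xs h]

theorem fields_match_alt_iff (fields : List (String × String)) (l : List (String × List (String × String))) :
    fields_match_alt fields l = true ↔ FMSpec fields l := by
  unfold fields_match_alt FMSpec
  dsimp only
  split_ifs with h1 h2
  · have hnd : (fields.map Prod.fst).Nodup := by
      rw [← length_ofList_eq_iff]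
      simpa using h1
    have hsub : ∀ p ∈ fields, ∃ q ∈ l, q.1 = p.1 := by
      intro p hp
      have := (PySem.Set.issubset_iff _ _).mp h2 p.1
        ((PySem.Set.mem_ofList _ _).mpr (List.mem_map.mpr ⟨p, hp, rfl⟩))
      simp only [PySem.Dict.keys, List.mem_map] at this
      obtain ⟨q, hq, hq1⟩ := this
      exact ⟨q, hq, hq1⟩
    simp only [List.all_eq_true, List.mem_filter]
    constructor
    · intro hall
      refine ⟨hnd, hsub, ?_⟩
      intro q hq
      by_cases hm : q.1 ∈ fields.map Prod.fst
      · obtain ⟨p, hp, hp1⟩ := List.mem_map.mp hm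
        exact Or.inl ⟨p, hp, hp1⟩
      · refine Or.inr (hall q ⟨hq, ?_⟩)
        simp only [Bool.not_eq_eq_eq_not, Bool.not_true]
        simpa [PySem.Set.contains, PySem.Set.mem_ofList] using hm
    · rintro ⟨-, -, hrem⟩ q ⟨hq, hqn⟩
      rcases hrem q hq with ⟨p, hp, hpq⟩ | hfb
      · exfalso
        have : q.1 ∈ PySem.Set.ofList (fields.map Prod.fst) :=
          (PySem.Set.mem_ofList _ _).mpr (List.mem_map.mpr ⟨p, hp, hpq⟩)
        simp only [Bool.not_eq_eq_eq_not, Bool.not_true] at hqn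
        simp [PySem.Set.contains, this] at hqn
      · exact hfb
  · simp only [false_iff]
    rintro ⟨-, hall, -⟩
    apply h2
    rw [PySem.Set.issubset_iff]
    intro x hx
    obtain ⟨p, hp, hp1⟩ := List.mem_map.mp ((PySem.Set.mem_ofList _ _).mp hx)
    obtain ⟨q, hq, hq1⟩ := hall p hp
    simp only [PySem.Dict.keys]
    exact List.mem_map.mpr ⟨q, hq, by rw [hq1, hp1]⟩
  · simp only [false_iff]
    rintro ⟨hnd, -, -⟩
    apply h1
    rw [show fields.length = (fields.map Prod.fst).length by simp]
    exact (length_ofList_eq_iff _).mpr hnd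

-- ===== VERDICT (by name: the statement is the Claim_ definition above) =====
theorem fields_match_spec : Claim_equal_fields_match := by
  intro fields field_descriptors _
  unfold Spec_fields_match
  rw [Bool.eq_iff_iff, fields_match_iff, fields_match_alt_iff]
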